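-- pv_equiv track=rewrite | github.com/bequantit/openfarmAI_beta_sf | src/database.py | reduce_strings
-- ===== SOURCE A (Python) =====
-- def reduce_strings(strings: list) -> list:
--     """
--     Reducir cadenas de texto a cadenas únicas, ignorando el caso pero devolviendo el caso original.
--
--     Args:
--         strings (list): Lista de cadenas de texto.
--
--     Returns:
--         list: Lista de cadenas de texto reducidas a únicas, ignorando el caso pero devolviendo el caso original.
--     """
--     unique_strings = []
--     lower_to_original = {}
--
--     # Sort by length, descending
--     strings.sort(key=len, reverse=True)
--
--     for string in strings:
--         stripped_string = string.strip()
--         string_lower = stripped_string.lower()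
--
--         if not any(string_lower in unique.lower() for unique in unique_strings):
--             unique_strings.append(stripped_string)
--             lower_to_original[string_lower] = stripped_string
--
--     # Return unique strings respecting original case
--     return [lower_to_original[unique.lower()] for unique in unique_strings]
-- ===== SOURCE B (Python) =====
-- def reduce_strings(strings: list) -> list:
--     """Case-insensitive dedup dropping strings contained in kept ones.
--
--     Stateless per-element criterion instead of a greedy kept-set: after the
--     length-descending sort, element i is kept iff its lowered stripped form is
--     not a substring of the lowered stripped form of ANY earlier element
--     (substring containment is transitive, so testing against all earlier
--     elements equals testing against the kept ones only).
--     Sorts `strings` in place, like the original.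
--     """
--     strings.sort(key=len, reverse=True)
--     lows = [s.strip().lower() for s in strings]
--     return [strings[i].strip()
--             for i in range(len(lows))
--             if not any(lows[i] in earlier for earlier in lows[:i])]
-- ===== Notes on version B (the rewrite author's own statement) =====
-- stated objective: simpler
-- what changed: B drops A's greedy kept-set and dict entirely: after the length-descending sort it strips+lowers every string once and keeps element i iff its lowered form is not a substring of ANY earlier element's lowered form (a stateless per-index criterion, correct because substring containment is transitive), returning a single comprehension.
import Mathlib
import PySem

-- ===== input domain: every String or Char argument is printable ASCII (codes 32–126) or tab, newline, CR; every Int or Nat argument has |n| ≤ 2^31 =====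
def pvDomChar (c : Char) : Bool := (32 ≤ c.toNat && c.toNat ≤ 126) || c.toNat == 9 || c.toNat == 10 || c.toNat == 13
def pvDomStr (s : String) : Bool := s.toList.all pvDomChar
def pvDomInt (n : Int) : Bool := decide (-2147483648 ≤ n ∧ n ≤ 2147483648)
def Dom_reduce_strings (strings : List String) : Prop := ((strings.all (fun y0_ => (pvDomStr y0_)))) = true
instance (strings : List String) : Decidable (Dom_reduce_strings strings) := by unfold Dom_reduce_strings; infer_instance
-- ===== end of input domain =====

-- B replaces A's greedy kept-set (test each candidate against the strings kept so far) by a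
-- stateless per-index criterion (test each element against ALL earlier elements, correct by
-- transitivity of substring containment); both Pythons sort `strings` in place — the
-- equivalence is about the return value.

-- ===== PORT A =====
-- loop body of A's 'for string in strings' (state: unique_strings, lower_to_original)
def pvStepA (acc : List String × PySem.Dict String String) (string : String) :
    List String × PySem.Dict String String :=
  let stripped_string := PySem.Str.strip string
  let string_lower := PySem.Str.lower stripped_string
  if acc.1.any (fun unique => PySem.Str.isIn string_lower (PySem.Str.lower unique)) then acc
  else (acc.1 ++ [stripped_string], acc.2.insert string_lower stripped_string)

def reduce_strings (strings : List String) : List String :=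
  -- strings.sort(key=len, reverse=True)  (in-place in Python; return-value equivalence only)
  let sortedStrings := PySem.List.sorted strings (fun s => PySem.Str.len s) true
  let st := sortedStrings.foldl pvStepA ([], PySem.Dict.empty)
  -- lower_to_original[unique.lower()]: the key is always present (proved below), so the
  -- KeyError branch of Python's d[k] is unreachable and the .getD "" default is never taken.
  st.1.map (fun unique => (st.2.get? (PySem.Str.lower unique)).getD "")

-- ===== PORT B =====
def reduce_strings_alt (strings : List String) : List String :=
  let sortedStrings := PySem.List.sorted strings (fun s => PySem.Str.len s) true
  -- lows = [s.strip().lower() for s in strings]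
  let lows := sortedStrings.map (fun s => PySem.Str.lower (PySem.Str.strip s))
  -- [strings[i].strip() for i in range(len(lows)) if not any(lows[i] in e for e in lows[:i])]
  -- indices produced by range(len(lows)) are in range, so lows[i]/strings[i] are .getD
  (List.range lows.length).filterMap (fun i =>
    if (lows.take i).any (fun earlier => PySem.Str.isIn (lows.getD i "") earlier) then none
    else some (PySem.Str.strip (sortedStrings.getD i "")))

-- ===== PRECONDITION & SPEC =====
def Spec_reduce_strings (strings : List String) (out : List String) : Prop := out = reduce_strings_alt strings
instance (strings : List String) (out : List String) : Decidable (Spec_reduce_strings strings out) := by unfold Spec_reduce_strings; infer_instance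

-- ===== CLAIM (what is proved, stated in full; the proofs are below) =====
def Claim_equal_reduce_strings : Prop := ∀ (strings : List String), Dom_reduce_strings strings → Spec_reduce_strings strings (reduce_strings strings)

-- ===== LEMMAS AND PROOFS =====

-- lowered stripped form of a string
def pvFlow (s : String) : String := PySem.Str.lower (PySem.Str.strip s)

-- reference selection: walk the list keeping a prefix of lowered forms
def pvSel (pre : List String) : List String → List String
  | [] => []
  | s :: rest =>
      if pre.any (fun p => PySem.Str.isIn (pvFlow s) p) then pvSel (pre ++ [pvFlow s]) rest
      else PySem.Str.strip s :: pvSel (pre ++ [pvFlow s]) rest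

-- substring containment is transitive
lemma pv_isIn_trans {x p q : String} (h1 : PySem.Str.isIn x p = true)
    (h2 : PySem.Str.isIn p q = true) : PySem.Str.isIn x q = true :=
  (PySem.Str.isIn_iff_infix _ _).2
    (((PySem.Str.isIn_iff_infix _ _).1 h1).trans ((PySem.Str.isIn_iff_infix _ _).1 h2))

-- B's range/filterMap comprehension equals the reference selection
lemma pv_b_sel (l pre : List String) :
    (List.range l.length).filterMap (fun i =>
      if (((pre ++ l).map pvFlow).take (pre.length + i)).any
           (fun earlier => PySem.Str.isIn (((pre ++ l).map pvFlow).getD (pre.length + i) "") earlier)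
      then none
      else some (PySem.Str.strip ((pre ++ l).getD (pre.length + i) "")))
    = pvSel (pre.map pvFlow) l := by
  induction l generalizing pre with
  | nil => simp [pvSel]
  | cons s rest ih =>
    rw [List.length_cons, List.range_succ_eq_map, List.filterMap_cons, List.filterMap_map]
    have hgetS : (pre ++ s :: rest).getD (pre.length + 0) "" = s := by
      simp
    have hgetF : ((pre ++ s :: rest).map pvFlow).getD (pre.length + 0) "" = pvFlow s := by
      have : (pre ++ s :: rest).map pvFlow = pre.map pvFlow ++ pvFlow s :: rest.map pvFlow := by
        simp
      rw [this]
      simp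
    have htake : ((pre ++ s :: rest).map pvFlow).take (pre.length + 0) = pre.map pvFlow := by
      have : (pre ++ s :: rest).map pvFlow = pre.map pvFlow ++ pvFlow s :: rest.map pvFlow := by
        simp
      rw [this, Nat.add_zero]
      exact List.take_left' (by simp)
    have hrest : ∀ i : ℕ,
        (fun i => if (((pre ++ s :: rest).map pvFlow).take (pre.length + i)).any
              (fun earlier => PySem.Str.isIn (((pre ++ s :: rest).map pvFlow).getD (pre.length + i) "") earlier)
            then none
            else some (PySem.Str.strip ((pre ++ s :: rest).getD (pre.length + i) ""))) (i + 1)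
        = (fun i => if ((((pre ++ [s]) ++ rest).map pvFlow).take ((pre ++ [s]).length + i)).any
              (fun earlier => PySem.Str.isIn ((((pre ++ [s]) ++ rest).map pvFlow).getD ((pre ++ [s]).length + i) "") earlier)
            then none
            else some (PySem.Str.strip (((pre ++ [s]) ++ rest).getD ((pre ++ [s]).length + i) ""))) i := by
      intro i
      have e1 : pre ++ s :: rest = (pre ++ [s]) ++ rest := by simp
      have e2 : pre.length + (i + 1) = (pre ++ [s]).length + i := by simp; omega
      simp only [e1, e2]
    rw [hgetS, hgetF, htake]
    have hmapsel : List.filterMap (fun i =>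
        if (((pre ++ s :: rest).map pvFlow).take (pre.length + (i + 1))).any
            (fun earlier => PySem.Str.isIn (((pre ++ s :: rest).map pvFlow).getD (pre.length + (i + 1)) "") earlier)
        then none
        else some (PySem.Str.strip ((pre ++ s :: rest).getD (pre.length + (i + 1)) "")))
        (List.range rest.length)
        = pvSel ((pre ++ [s]).map pvFlow) rest := by
      rw [← ih (pre ++ [s])]
      apply List.filterMap_congr
      intro i _
      exact hrest i
    have hpremap : (pre ++ [s]).map pvFlow = pre.map pvFlow ++ [pvFlow s] := by simp
    rw [hpremap] at hmapsel
    by_cases hc : (pre.map pvFlow).any (fun earlier => PySem.Str.isIn (pvFlow s) earlier) = true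
    · simp only [hc, if_true, pvSel]
      rw [← hmapsel]
      apply List.filterMap_congr
      intro i _
      rfl
    · have hc' := eq_false_of_ne_true hc
      simp only [hc', pvSel, Bool.false_eq_true, if_false]
      rw [← hmapsel]
      refine congrArg (List.cons (PySem.Str.strip s)) ?_
      apply List.filterMap_congr
      intro i _
      rfl

-- the A-side loop invariant: the kept list extends by exactly the reference selection,
-- and the dict maps each kept string's lowered form back to itself
lemma pv_loopA (l : List String) (K : List String) (pre : List String)
    (d : PySem.Dict String String)
    (hiff : ∀ x : String, (∃ u ∈ K, PySem.Str.isIn x (PySem.Str.lower u) = true)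
        ↔ ∃ p ∈ pre, PySem.Str.isIn x p = true)
    (hd : ∀ u ∈ K, d.get? (PySem.Str.lower u) = some u) :
    ((l.foldl pvStepA (K, d)).1 = K ++ pvSel pre l)
    ∧ (∀ u ∈ (l.foldl pvStepA (K, d)).1,
        (l.foldl pvStepA (K, d)).2.get? (PySem.Str.lower u) = some u) := by
  induction l generalizing K pre d with
  | nil => simpa [pvSel] using hd
  | cons s rest ih =>
    have hcond : (K.any (fun u =>
          PySem.Str.isIn (PySem.Str.lower (PySem.Str.strip s)) (PySem.Str.lower u)))
        = (pre.any (fun p => PySem.Str.isIn (PySem.Str.lower (PySem.Str.strip s)) p)) := by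
      rw [Bool.eq_iff_iff, List.any_eq_true, List.any_eq_true]
      exact hiff (PySem.Str.lower (PySem.Str.strip s))
    by_cases hb : (K.any (fun u =>
        PySem.Str.isIn (PySem.Str.lower (PySem.Str.strip s)) (PySem.Str.lower u))) = true
    · -- dropped: A's state unchanged, pre grows by the lowered stripped form
      have hpre : (pre.any (fun p =>
          PySem.Str.isIn (PySem.Str.lower (PySem.Str.strip s)) p)) = true := hcond ▸ hb
      have hstep : pvStepA (K, d) s = (K, d) := by
        simp only [pvStepA]
        rw [if_pos hb]
      rw [List.foldl_cons, hstep]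
      have hiff' : ∀ x : String, (∃ u ∈ K, PySem.Str.isIn x (PySem.Str.lower u) = true)
          ↔ ∃ p ∈ pre ++ [PySem.Str.lower (PySem.Str.strip s)], PySem.Str.isIn x p = true := by
        intro x
        constructor
        · rintro h
          obtain ⟨p, hp, hxp⟩ := (hiff x).1 h
          exact ⟨p, List.mem_append_left _ hp, hxp⟩
        · rintro ⟨p, hp, hxp⟩
          rcases List.mem_append.1 hp with hp | hp
          · exact (hiff x).2 ⟨p, hp, hxp⟩
          · rcases List.mem_singleton.1 hp with rfl
            obtain ⟨u, hu, hfu⟩ := List.any_eq_true.1 hb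
            exact ⟨u, hu, pv_isIn_trans hxp hfu⟩
      have hrec := ih K (pre ++ [PySem.Str.lower (PySem.Str.strip s)]) d hiff' hd
      refine ⟨?_, hrec.2⟩
      rw [hrec.1]
      have hsel : pvSel pre (s :: rest)
          = pvSel (pre ++ [PySem.Str.lower (PySem.Str.strip s)]) rest := by
        simp only [pvSel, pvFlow]
        rw [if_pos hpre]
      rw [hsel]
    · -- kept
      have hb' : (K.any (fun u =>
          PySem.Str.isIn (PySem.Str.lower (PySem.Str.strip s)) (PySem.Str.lower u))) = false := by
        simpa using hb
      have hpre : (pre.any (fun p =>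
          PySem.Str.isIn (PySem.Str.lower (PySem.Str.strip s)) p)) = false := hcond ▸ hb'
      have hstep : pvStepA (K, d) s = (K ++ [PySem.Str.strip s],
          d.insert (PySem.Str.lower (PySem.Str.strip s)) (PySem.Str.strip s)) := by
        simp only [pvStepA]
        rw [if_neg hb]
      rw [List.foldl_cons, hstep]
      have hiff' : ∀ x : String,
          (∃ u ∈ K ++ [PySem.Str.strip s], PySem.Str.isIn x (PySem.Str.lower u) = true)
          ↔ ∃ p ∈ pre ++ [PySem.Str.lower (PySem.Str.strip s)], PySem.Str.isIn x p = true := by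
        intro x
        constructor
        · rintro ⟨u, hu, hxu⟩
          rcases List.mem_append.1 hu with hu | hu
          · obtain ⟨p, hp, hxp⟩ := (hiff x).1 ⟨u, hu, hxu⟩
            exact ⟨p, List.mem_append_left _ hp, hxp⟩
          · rcases List.mem_singleton.1 hu with rfl
            exact ⟨PySem.Str.lower (PySem.Str.strip s),
              List.mem_append_right _ (List.mem_singleton.2 rfl), hxu⟩
        · rintro ⟨p, hp, hxp⟩
          rcases List.mem_append.1 hp with hp | hp
          · obtain ⟨u, hu, hxu⟩ := (hiff x).2 ⟨p, hp, hxp⟩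
            exact ⟨u, List.mem_append_left _ hu, hxu⟩
          · rcases List.mem_singleton.1 hp with rfl
            exact ⟨PySem.Str.strip s,
              List.mem_append_right _ (List.mem_singleton.2 rfl), hxp⟩
      have hd' : ∀ u ∈ K ++ [PySem.Str.strip s],
          (d.insert (PySem.Str.lower (PySem.Str.strip s)) (PySem.Str.strip s)).get?
            (PySem.Str.lower u) = some u := by
        intro u hu
        rcases List.mem_append.1 hu with hu | hu
        · have hne : PySem.Str.lower u ≠ PySem.Str.lower (PySem.Str.strip s) := by
            intro he
            have : (K.any (fun v =>
                PySem.Str.isIn (PySem.Str.lower (PySem.Str.strip s)) (PySem.Str.lower v))) = true :=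
              List.any_eq_true.2 ⟨u, hu, by
                rw [he]
                exact (PySem.Str.isIn_iff_infix _ _).2 (List.infix_refl _)⟩
            rw [this] at hb'
            cases hb'
          rw [PySem.Dict.get?_insert, if_neg hne]
          exact hd u hu
        · rcases List.mem_singleton.1 hu with rfl
          rw [PySem.Dict.get?_insert, if_pos rfl]
      have hrec := ih (K ++ [PySem.Str.strip s]) (pre ++ [PySem.Str.lower (PySem.Str.strip s)])
        (d.insert (PySem.Str.lower (PySem.Str.strip s)) (PySem.Str.strip s)) hiff' hd'
      refine ⟨?_, hrec.2⟩
      rw [hrec.1]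
      have hsel : pvSel pre (s :: rest)
          = PySem.Str.strip s :: pvSel (pre ++ [PySem.Str.lower (PySem.Str.strip s)]) rest := by
        simp only [pvSel, pvFlow]
        rw [if_neg (by rw [hpre]; exact Bool.false_ne_true)]
      rw [hsel, List.append_assoc, List.singleton_append]

-- ===== VERDICT (by name: the statement is the Claim_ definition above) =====
theorem reduce_strings_spec : Claim_equal_reduce_strings := by
  intro strings _
  unfold Spec_reduce_strings
  simp only [reduce_strings, reduce_strings_alt]
  have h := pv_loopA (PySem.List.sorted strings (fun s => PySem.Str.len s) true)
    [] [] PySem.Dict.empty (by intro x; simp) (by intro u hu; simp at hu)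
  have hB := pv_b_sel (PySem.List.sorted strings (fun s => PySem.Str.len s) true) []
  simp only [List.nil_append, List.length_nil, List.map_nil, Nat.zero_add] at hB h
  rw [h.1]
  have hmap : ∀ u ∈ pvSel [] (PySem.List.sorted strings (fun s => PySem.Str.len s) true),
      ((((PySem.List.sorted strings (fun s => PySem.Str.len s) true).foldl
        pvStepA ([], PySem.Dict.empty)).2.get? (PySem.Str.lower u)).getD "") = u := by
    intro u hu
    rw [h.2 u (by rw [h.1]; exact hu)]
    rfl
  rw [List.map_congr_left hmap, List.map_id']
  rw [← hB]
  simp only [List.length_map]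
  apply List.filterMap_congr
  intro i _
  rfl
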